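-- pv_equiv track=rewrite | github.com/march5/AI_basics | class1/Funkcja.py | func
-- ===== SOURCE A (Python) =====
-- def func(lista):
--     suma = lista[0]
--     diff = suma
--     prod = suma
--     for x in lista[1:]:
--         suma += x
--         diff -= x
--         prod *= x
--
--     return suma, diff, prod
-- ===== SOURCE B (Python) =====
-- def func(lista):
--     suma = sum(lista)
--     diff = 2 * lista[0] - suma
--     prod = 1
--     for x in lista:
--         prod *= x
--     return suma, diff, prod
-- ===== Notes on version B (the rewrite author's own statement) =====
-- stated objective: idiomatic
-- what changed: Replaced the single fused loop carrying three accumulators by independent reductions: suma = sum(lista), diff computed by the closed form 2*lista[0] - suma, and the product as its own pass from 1.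
import Mathlib
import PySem

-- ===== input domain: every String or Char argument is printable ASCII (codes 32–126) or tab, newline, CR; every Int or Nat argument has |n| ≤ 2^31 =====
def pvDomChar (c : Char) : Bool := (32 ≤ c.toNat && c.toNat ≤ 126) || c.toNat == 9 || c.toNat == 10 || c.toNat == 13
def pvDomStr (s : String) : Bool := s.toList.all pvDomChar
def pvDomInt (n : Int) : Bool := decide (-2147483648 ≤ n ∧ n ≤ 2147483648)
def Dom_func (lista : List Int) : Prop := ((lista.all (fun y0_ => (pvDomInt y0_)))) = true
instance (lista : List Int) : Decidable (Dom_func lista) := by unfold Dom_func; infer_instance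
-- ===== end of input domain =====

-- B replaces A's single fused three-accumulator loop by independent reductions (sum, a closed form for diff, a separate product pass); equivalence of return values on non-empty lists.

-- ===== PORT A =====
-- A: suma = diff = prod = lista[0]; one loop over lista[1:] updating all three.
def func (lista : List Int) : Int × Int × Int :=
  match lista with
  | [] => (0, 0, 0)  -- unreachable under Pre_func (Python raises IndexError on lista[0])
  | h :: t =>
    t.foldl (fun st x => (st.1 + x, st.2.1 - x, st.2.2 * x)) (h, h, h)

-- ===== PORT B =====
-- B: suma = sum(lista); diff = 2*lista[0] - suma; prod = separate pass from 1.
def func_alt (lista : List Int) : Int × Int × Int :=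
  let suma := lista.foldl (· + ·) 0
  let diff := match lista with
    | [] => 0  -- unreachable under Pre_func (Python raises IndexError on lista[0])
    | h :: _ => 2 * h - suma
  let prod := lista.foldl (· * ·) 1
  (suma, diff, prod)

-- ===== PRECONDITION & SPEC =====
-- Pre_func excludes the empty list, on which the Python A raises IndexError at lista[0].
def Pre_func (lista : List Int) : Prop := lista ≠ []
instance (lista : List Int) : Decidable (Pre_func lista) := by unfold Pre_func; infer_instance
def pvWitness_func : List Int := [3, -2, 5]

def Spec_func (lista : List Int) (out : Int × Int × Int) : Prop := out = func_alt lista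
instance (lista : List Int) (out : Int × Int × Int) : Decidable (Spec_func lista out) := by unfold Spec_func; infer_instance

-- ===== CLAIM (what is proved, stated in full; the proofs are below) =====
def Claim_equal_func : Prop := ∀ (lista : List Int), Dom_func lista → Pre_func lista → Spec_func lista (func lista)

-- ===== LEMMAS AND PROOFS =====
theorem foldl_add_shift (t : List Int) (a : Int) :
    t.foldl (· + ·) a = a + t.foldl (· + ·) 0 := by
  induction t generalizing a with
  | nil => simp
  | cons x t ih => simp [List.foldl, ih (a + x), ih x]; ring

theorem foldl_mul_shift (t : List Int) (a : Int) :
    t.foldl (· * ·) a = a * t.foldl (· * ·) 1 := by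
  induction t generalizing a with
  | nil => simp
  | cons x t ih => simp [List.foldl, ih (a * x), ih x]; ring

theorem func_loop (t : List Int) (a b c : Int) :
    t.foldl (fun st x => (st.1 + x, st.2.1 - x, st.2.2 * x)) (a, b, c) =
      (a + t.foldl (· + ·) 0, b - t.foldl (· + ·) 0, c * t.foldl (· * ·) 1) := by
  induction t generalizing a b c with
  | nil => simp
  | cons x t ih =>
    simp only [List.foldl_cons]
    rw [ih, foldl_add_shift t (0 + x), foldl_mul_shift t (1 * x)]
    refine Prod.ext ?_ (Prod.ext ?_ ?_) <;> simp <;> ring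

-- ===== VERDICT (by name: the statement is the Claim_ definition above) =====
theorem func_spec : Claim_equal_func := by
  intro lista _ hpre
  unfold Spec_func func func_alt
  match lista with
  | [] => exact absurd rfl hpre
  | h :: t =>
    simp only [List.foldl_cons]
    rw [func_loop, foldl_add_shift t (0 + h), foldl_mul_shift t (1 * h)]
    refine Prod.ext ?_ (Prod.ext ?_ ?_) <;> simp <;> ring
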